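-- pv_equiv track=rewrite | github.com/coinse/contrastive-FL | BM25_preprocess.py | convert_signature
-- ===== SOURCE A (Python) =====
-- def convert_signature(flat_name):
--     try:
--         method = flat_name.split('(')[0]
--         signature = flat_name.split('(')[1][:-1]
--     except IndexError:
--         return flat_name
--
--     opened = 0
--     replaced = ""
--     for c in signature:
--         if c == '<':
--             opened += 1
--         elif c == '>':
--             opened -= 1
--         else:
--             if opened > 0:
--                 continue
--             else:
--                 replaced += c
--     return method + '(' + replaced + ')'
-- ===== SOURCE B (Python) =====
-- def convert_signature(flat_name):
--     parts = flat_name.split('(')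
--     if len(parts) < 2:
--         return flat_name
--     signature = parts[1][:-1]
--     replaced = ''.join(
--         c for i, c in enumerate(signature)
--         if c != '<' and c != '>'
--         and signature[:i].count('<') <= signature[:i].count('>'))
--     return parts[0] + '(' + replaced + ')'
-- ===== Notes on version B (the rewrite author's own statement) =====
-- stated objective: alternative
-- what changed: The stateful counter loop (opened incremented/decremented, string accumulated char by char) is replaced by a stateless comprehension over enumerate(signature) that keeps each non-bracket char whose prefix contains no more opening than closing angle brackets, joined once.
import Mathlib
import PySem

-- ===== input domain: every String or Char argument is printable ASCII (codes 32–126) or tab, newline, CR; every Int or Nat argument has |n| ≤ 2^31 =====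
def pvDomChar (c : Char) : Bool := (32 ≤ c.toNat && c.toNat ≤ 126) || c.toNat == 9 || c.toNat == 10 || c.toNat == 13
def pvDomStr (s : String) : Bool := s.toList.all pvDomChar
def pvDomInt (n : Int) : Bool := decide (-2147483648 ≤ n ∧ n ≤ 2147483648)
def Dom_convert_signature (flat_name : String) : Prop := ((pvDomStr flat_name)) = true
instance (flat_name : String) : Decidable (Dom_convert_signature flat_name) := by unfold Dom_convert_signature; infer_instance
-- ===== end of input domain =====

-- B replaces A's stateful bracket-depth counter loop by a stateless filtering
-- comprehension over enumerated characters using prefix angle-bracket counts (alternative decomposition).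

-- ===== PORT A =====
def convert_signature (flat_name : String) : String :=
  let parts := PySem.Chars.splitOn flat_name.toList ['(']
  match PySem.List.pyGet? parts 0, PySem.List.pyGet? parts 1 with
  | some method, some p1 =>
    -- signature = flat_name.split('(')[1][:-1]
    let signature := PySem.List.slice p1 none (some (-1))
    let st := signature.foldl
      (fun (st : Int × List Char) c =>
        if c = '<' then (st.1 + 1, st.2)
        else if c = '>' then (st.1 - 1, st.2)
        else if st.1 > 0 then st else (st.1, st.2 ++ [c]))
      (0, [])
    String.ofList (method ++ '(' :: st.2 ++ [')'])
  | _, _ => flat_name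

-- ===== PORT B =====
def convert_signature_alt (flat_name : String) : String :=
  let parts := PySem.Chars.splitOn flat_name.toList ['(']
  if parts.length < 2 then flat_name
  else
    let signature := PySem.List.slice (parts.getD 1 []) none (some (-1))
    let replaced := (PySem.List.enumerate signature 0).filterMap
      (fun p =>
        if p.2 ≠ '<' ∧ p.2 ≠ '>' ∧
            (PySem.List.slice signature none (some p.1)).count '<' ≤
            (PySem.List.slice signature none (some p.1)).count '>'
        then some p.2 else none)
    String.ofList (parts.getD 0 [] ++ '(' :: replaced ++ [')'])

-- ===== PRECONDITION & SPEC =====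
def Spec_convert_signature (flat_name : String) (out : String) : Prop := out = convert_signature_alt flat_name
instance (flat_name : String) (out : String) : Decidable (Spec_convert_signature flat_name out) := by unfold Spec_convert_signature; infer_instance

-- ===== CLAIM (what is proved, stated in full; the proofs are below) =====
def Claim_equal_convert_signature : Prop := ∀ (flat_name : String), Dom_convert_signature flat_name → Spec_convert_signature flat_name (convert_signature flat_name)

-- ===== LEMMAS AND PROOFS =====

-- A's loop body and its recursive characterisation
def pvStep (st : Int × List Char) (c : Char) : Int × List Char :=
  if c = '<' then (st.1 + 1, st.2)
  else if c = '>' then (st.1 - 1, st.2)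
  else if st.1 > 0 then st else (st.1, st.2 ++ [c])

def pvSel (d : Int) : List Char → List Char
  | [] => []
  | c :: s =>
    if c = '<' then pvSel (d + 1) s
    else if c = '>' then pvSel (d - 1) s
    else (if d ≤ 0 then [c] else []) ++ pvSel d s

def pvDelta (c : Char) : Int := if c = '<' then 1 else if c = '>' then -1 else 0

def pvDepth (l : List Char) : Int := (l.count '<' : Int) - (l.count '>' : Int)

theorem pvDepth_nil : pvDepth [] = 0 := by simp [pvDepth]

theorem pvDepth_cons (c : Char) (l : List Char) :
    pvDepth (c :: l) = pvDelta c + pvDepth l := by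
  simp only [pvDepth, pvDelta, List.count_cons]
  by_cases h1 : c = '<'
  · subst h1; simp; ring
  · by_cases h2 : c = '>'
    · subst h2; simp; ring
    · simp [h1, h2]

theorem pvLoop_eq (s : List Char) : ∀ (d : Int) (acc : List Char),
    (s.foldl pvStep (d, acc)).2 = acc ++ pvSel d s := by
  induction s with
  | nil => intro d acc; simp [pvSel]
  | cons c s ih =>
    intro d acc
    simp only [List.foldl_cons, pvStep, pvSel]
    split_ifs with h1 h2 h3 <;> simp [ih] <;> omega

theorem pvEnum_shift (s : List Char) : ∀ (k : Int),
    PySem.List.enumerate s k = (PySem.List.enumerate s 0).map (fun p => (p.1 + k, p.2)) := by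
  induction s with
  | nil => intro k; simp [PySem.List.enumerate_nil]
  | cons c s ih =>
    intro k
    simp only [PySem.List.enumerate_cons, ih (k := k + 1), ih (k := 0 + 1),
      List.map_cons, List.map_map]
    congr 1
    · simp
    · apply List.map_congr_left; intro p _
      simp only [Function.comp, Prod.mk.injEq]
      exact ⟨by omega, trivial⟩

theorem pvSel_eq (s : List Char) : ∀ (d : Int),
    pvSel d s = (PySem.List.enumerate s 0).filterMap
      (fun p => if p.2 ≠ '<' ∧ p.2 ≠ '>' ∧ d + pvDepth (s.take p.1.toNat) ≤ 0
                then some p.2 else none) := by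
  induction s with
  | nil => intro d; simp [pvSel, PySem.List.enumerate_nil]
  | cons c s ih =>
    intro d
    rw [PySem.List.enumerate_cons, List.filterMap_cons, pvEnum_shift s (k := 0 + 1),
        List.filterMap_map]
    have hrest :
        (PySem.List.enumerate s 0).filterMap
          ((fun p => if p.2 ≠ '<' ∧ p.2 ≠ '>' ∧ d + pvDepth ((c :: s).take p.1.toNat) ≤ 0
                     then some p.2 else none) ∘ (fun p => (p.1 + (0 + 1), p.2)))
        = pvSel (d + pvDelta c) s := by
      rw [ih]
      apply List.filterMap_congr
      intro p hp
      rcases (PySem.List.mem_enumerate_iff s 0 p).mp hp with ⟨k, hk, rfl⟩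
      have h1 : ((0 : Int) + k + (0 + 1)).toNat = k + 1 := by omega
      have h3 : ((0 : Int) + k).toNat = k := by omega
      simp only [Function.comp, h1, h3, List.take_succ_cons, pvDepth_cons]
      congr 1
      simp only [eq_iff_iff]
      constructor <;> (rintro ⟨a, b, hle⟩; exact ⟨a, b, by omega⟩)
    have hhead : pvDepth ((c :: s).take ((0 : Int)).toNat) = 0 := by
      simp [pvDepth]
    rw [hrest]
    by_cases h1 : c = '<'
    · subst h1
      rw [pvSel]
      simp [pvDelta]
    · by_cases h2 : c = '>'
      · subst h2
        rw [pvSel]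
        simp only [if_neg h1, if_true]
        have h4 : pvDelta '>' = -1 := by decide
        have h5 : d - 1 = d + -1 := by ring
        simp [h4, h1, h5]
      · rw [pvSel]
        simp only [if_neg h1, if_neg h2]
        have hδ : pvDelta c = 0 := by simp [pvDelta, h1, h2]
        by_cases hd : d ≤ 0
        · simp [h1, h2, hd, hδ, pvDepth_nil]
        · simp [h1, h2, hd, hδ, pvDepth_nil]

theorem pvB_cond (s : List Char) (p : Int × Char) (hp : p ∈ PySem.List.enumerate s 0) :
    (if p.2 ≠ '<' ∧ p.2 ≠ '>' ∧
        (PySem.List.slice s none (some p.1)).count '<' ≤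
        (PySem.List.slice s none (some p.1)).count '>'
     then some p.2 else none)
    = (if p.2 ≠ '<' ∧ p.2 ≠ '>' ∧ (0 : Int) + pvDepth (s.take p.1.toNat) ≤ 0
       then some p.2 else none) := by
  rcases (PySem.List.mem_enumerate_iff s 0 p).mp hp with ⟨k, hk, rfl⟩
  have h0 : ((0 : Int) + k) = (k : Int) := by omega
  simp only [h0, PySem.List.slice_to_natCast, Int.toNat_natCast]
  congr 1
  simp only [eq_iff_iff, pvDepth]
  constructor <;> (rintro ⟨a, b, hle⟩; refine ⟨a, b, ?_⟩) <;> omega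

-- ===== VERDICT (by name: the statement is the Claim_ definition above) =====
theorem convert_signature_spec : Claim_equal_convert_signature := by
  intro flat_name _
  unfold Spec_convert_signature convert_signature convert_signature_alt
  cases hp : PySem.Chars.splitOn flat_name.toList ['('] with
  | nil => simp [PySem.List.pyGet?, PySem.List.pyIdx?]
  | cons x rest =>
    cases rest with
    | nil => simp [PySem.List.pyGet?, PySem.List.pyIdx?]
    | cons y rest2 =>
      have hg0 : PySem.List.pyGet? (x :: y :: rest2) (0 : Int) = some x := by
        simpa using PySem.List.pyGet?_natCast (x :: y :: rest2) 0
      have hg1 : PySem.List.pyGet? (x :: y :: rest2) (1 : Int) = some y := by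
        simpa using PySem.List.pyGet?_natCast (x :: y :: rest2) 1
      have hlen : ¬ (x :: y :: rest2).length < 2 := by simp
      simp only [hg0, hg1, if_neg hlen, List.getD_cons_zero, List.getD_cons_succ]
      have hloop := pvLoop_eq (PySem.List.slice y none (some (-1))) 0 []
      have hsel := pvSel_eq (PySem.List.slice y none (some (-1))) 0
      have hcond := List.filterMap_congr
        (fun p hp => pvB_cond (PySem.List.slice y none (some (-1))) p hp)
      rw [show (fun (st : Int × List Char) c =>
        if c = '<' then (st.1 + 1, st.2)
        else if c = '>' then (st.1 - 1, st.2)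
        else if st.1 > 0 then st else (st.1, st.2 ++ [c])) = pvStep from rfl]
      rw [hloop, hsel, hcond]
      simp
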